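-- pv_equiv track=rewrite | github.com/jonathonfletcher/adventofcode | 2024/20/a.py | make_distances
-- ===== SOURCE A (Python) =====
-- import collections
--
-- def make_distances(maxjumps, /):
--     distances = collections.defaultdict(set)
--     mindy = -maxjumps
--     maxdy = maxjumps + 1
--     for dy in range(mindy, maxdy):
--         ady = abs(dy)
--
--         mindx = mindy + ady
--         maxdx = maxdy - ady
--         for dx in range(mindx, maxdx):
--             adx = abs(dx)
--             if ady + adx > 1:
--                 distances[ady + adx].add((dx, dy))
--
--     return distances
-- ===== SOURCE B (Python) =====
-- import collections
--
-- def make_distances(maxjumps, /):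
--     # Different decomposition: build each Manhattan ring directly, keyed by distance,
--     # instead of scanning the diamond row by row and accumulating into the dict.
--     distances = collections.defaultdict(set)
--     for d in range(maxjumps, 1, -1):
--         ring = set()
--         for dy in range(-d, d + 1):
--             rem = d - abs(dy)
--             ring.add((-rem, dy))
--             if rem:
--                 ring.add((rem, dy))
--         distances[d] = ring
--     return distances
-- ===== Notes on version B (the rewrite author's own statement) =====
-- stated objective: alternative
-- what changed: Instead of scanning the diamond row by row and accumulating offsets into a defaultdict keyed by their Manhattan distance, B loops over the distances themselves (maxjumps down to 2) and constructs each ring directly (two points per row, one on the axis), assigning it once per key.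
import Mathlib
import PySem

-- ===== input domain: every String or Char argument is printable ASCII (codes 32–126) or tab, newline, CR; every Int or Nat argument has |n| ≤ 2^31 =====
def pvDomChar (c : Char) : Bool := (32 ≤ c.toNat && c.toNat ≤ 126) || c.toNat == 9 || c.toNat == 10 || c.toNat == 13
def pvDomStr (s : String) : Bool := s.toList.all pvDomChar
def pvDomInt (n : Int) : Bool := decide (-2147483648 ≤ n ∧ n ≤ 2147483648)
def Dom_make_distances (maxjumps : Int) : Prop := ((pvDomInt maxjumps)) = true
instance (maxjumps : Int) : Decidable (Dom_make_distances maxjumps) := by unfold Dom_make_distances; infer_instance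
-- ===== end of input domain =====

-- B builds each Manhattan ring directly per distance instead of A's row-by-row diamond
-- scan accumulating into a defaultdict; same returned mapping, by a different decomposition.

-- ===== PORT A =====
-- Literal port of A: scan the diamond row by row (dy, then dx), adding each offset
-- to the set at key |dy|+|dx| of a defaultdict(set); return its items.
def make_distances (maxjumps : Int) : List (Int × List (Int × Int)) :=
  ((PySem.List.pyRange (-maxjumps) (maxjumps + 1) 1).foldl
      (fun (distances : PySem.Dict Int (PySem.Set (Int × Int))) dy =>
        (PySem.List.pyRange (-maxjumps + |dy|) (maxjumps + 1 - |dy|) 1).foldl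
          (fun distances dx =>
            if 1 < |dy| + |dx| then
              distances.modify (|dy| + |dx|) PySem.Set.empty (fun s => s.add (dx, dy))
            else distances)
          distances)
      PySem.Dict.empty).items

-- ===== PORT B =====
-- Port of B: for each distance d from maxjumps down to 2, build its ring as a set
-- (two points per row, one on the axis) and assign it to key d.
def ringOf (d : Int) : PySem.Set (Int × Int) :=
  (PySem.List.pyRange (-d) (d + 1) 1).foldl
    (fun ring dy =>
      let rem := d - |dy|
      let ring' := ring.add (-rem, dy)
      if rem ≠ 0 then ring'.add (rem, dy) else ring')
    PySem.Set.empty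

def make_distances_alt (maxjumps : Int) : List (Int × List (Int × Int)) :=
  ((PySem.List.pyRange maxjumps 1 (-1)).foldl
      (fun (distances : PySem.Dict Int (PySem.Set (Int × Int))) d =>
        distances.insert d (ringOf d))
      PySem.Dict.empty).items

-- ===== PRECONDITION & SPEC =====
def Spec_make_distances (maxjumps : Int) (out : List (Int × List (Int × Int))) : Prop := out = make_distances_alt maxjumps
instance (maxjumps : Int) (out : List (Int × List (Int × Int))) : Decidable (Spec_make_distances maxjumps out) := by unfold Spec_make_distances; infer_instance

-- ===== CLAIM (what is proved, stated in full; the proofs are below) =====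
def Claim_equal_make_distances : Prop := ∀ (maxjumps : Int), Dom_make_distances maxjumps → Spec_make_distances maxjumps (make_distances maxjumps)

-- ===== LEMMAS AND PROOFS =====

-- key under which A files the offset p = (dx, dy)
def pvKey (p : Int × Int) : Int := |p.2| + |p.1|

-- A's dict-update step for one diamond cell
def pvStep (d : PySem.Dict Int (PySem.Set (Int × Int))) (p : Int × Int) :
    PySem.Dict Int (PySem.Set (Int × Int)) :=
  d.modify (pvKey p) PySem.Set.empty (fun s => s.add p)

-- the cells of row dy of A's diamond that pass A's `> 1` test, in A's dx order
def pvRowE (m dy : Int) : List (Int × Int) :=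
  ((PySem.List.pyRange (-m + |dy|) (m + 1 - |dy|) 1).filter
      (fun dx => 1 < |dy| + |dx|)).map (fun dx => (dx, dy))

-- all cells A touches, in A's traversal order
def pvE (m : Int) : List (Int × Int) :=
  (PySem.List.pyRange (-m) (m + 1) 1).flatMap (pvRowE m)

def pvD (m : Int) : PySem.Dict Int (PySem.Set (Int × Int)) :=
  (pvE m).foldl pvStep PySem.Dict.empty

-- the points of ring c contributed by row dy, in order
def pvElems (c dy : Int) : List (Int × Int) :=
  if c - |dy| = 0 then [(0, dy)] else [(-(c - |dy|), dy), (c - |dy|, dy)]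

-- ring c as an ordered list of points
def pvRing (c : Int) : List (Int × Int) :=
  (PySem.List.pyRange (-c) (c + 1) 1).flatMap (pvElems c)

-- the keys of row dy, in order
def pvRowK (m dy : Int) : List Int :=
  ((PySem.List.pyRange (-m + |dy|) (m + 1 - |dy|) 1).filter
      (fun dx => 1 < |dy| + |dx|)).map (fun dx => |dy| + |dx|)

lemma pvA_eq_items (m : Int) : make_distances m = (pvD m).items := by
  unfold make_distances pvD pvE
  rw [List.foldl_flatMap]
  congr 1
  apply PySem.List.foldl_congr_mem
  intro acc dy _
  unfold pvRowE
  rw [List.foldl_map, List.foldl_filter]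
  apply PySem.List.foldl_congr_mem
  intro d dx _
  by_cases h : 1 < |dy| + |dx| <;> simp [h, pvStep, pvKey]

lemma pv_getD_fold (E : List (Int × Int)) (d : PySem.Dict Int (PySem.Set (Int × Int))) (c : Int) :
    (E.foldl pvStep d).getD c PySem.Set.empty =
      PySem.Set.update (d.getD c PySem.Set.empty) (E.filter (fun p => pvKey p == c)) := by
  induction E generalizing d with
  | nil => simp [PySem.Set.update]
  | cons p E ih =>
    simp only [List.foldl_cons, List.filter_cons]
    by_cases h : pvKey p = c
    · simp only [h, beq_self_eq_true, if_pos]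
      rw [ih]
      have hg : (pvStep d p).getD c PySem.Set.empty =
          PySem.Set.add (d.getD c PySem.Set.empty) p := by
        unfold pvStep
        rw [PySem.Dict.getD_modify, if_pos h.symm, h]
      rw [hg]
      rfl
    · have hb : (pvKey p == c) = false := by simp [h]
      simp only [hb, Bool.false_eq_true, if_neg, not_false_iff]
      rw [ih]
      have hg : (pvStep d p).getD c PySem.Set.empty = d.getD c PySem.Set.empty := by
        unfold pvStep
        rw [PySem.Dict.getD_modify, if_neg (fun hc => h hc.symm)]
      rw [hg]

lemma pv_update_eq_self {α : Type} [BEq α] [LawfulBEq α] (s : PySem.Set α) (l : List α)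
    (h : ∀ x ∈ l, x ∈ s) : PySem.Set.update s l = s := by
  induction l generalizing s with
  | nil => rfl
  | cons a l ih =>
    have : PySem.Set.update s (a :: l) = PySem.Set.update (s.add a) l := rfl
    rw [this, PySem.Set.add_of_mem (h a (by simp))]
    exact ih s (fun x hx => h x (by simp [hx]))

lemma pv_update_singleton {α : Type} [BEq α] (s : PySem.Set α) (a : α) :
    PySem.Set.update s [a] = s.add a := rfl

lemma pv_pyRange_neg_append (a b : Int) (h : b ≤ a) :
    PySem.List.pyRange a b (-1) ++ [b] = PySem.List.pyRange a (b - 1) (-1) := by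
  rw [PySem.List.pyRange_neg_one_eq_reverse a b, PySem.List.pyRange_neg_one_eq_reverse a (b - 1),
    show b - 1 + 1 = b by ring,
    show PySem.List.pyRange b (a + 1) 1 = b :: PySem.List.pyRange (b + 1) (a + 1) 1 from
      PySem.List.pyRange_one_cons (by omega)]
  simp

-- filtering a symmetric integer range by |x| = r
lemma pv_filter_abs (w r : Int) (hw : 0 ≤ w) :
    (PySem.List.pyRange (-w) (w + 1) 1).filter (fun x => decide (|x| = r)) =
      if r = 0 then [0] else if 1 ≤ r ∧ r ≤ w then [-r, r] else [] := by
  by_cases h0 : r = 0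
  · subst h0
    have hL : (PySem.List.pyRange (-w) 0 1).filter (fun x => decide (|x| = 0)) = [] :=
      List.filter_eq_nil_iff.mpr (fun x hx => by
        rw [PySem.List.mem_pyRange_one] at hx
        simp only [decide_eq_true_eq]
        rcases abs_cases x with ⟨h1, h2⟩ | ⟨h1, h2⟩ <;> omega)
    have hR : (PySem.List.pyRange 1 (w + 1) 1).filter (fun x => decide (|x| = 0)) = [] :=
      List.filter_eq_nil_iff.mpr (fun x hx => by
        rw [PySem.List.mem_pyRange_one] at hx
        simp only [decide_eq_true_eq]
        rcases abs_cases x with ⟨h1, h2⟩ | ⟨h1, h2⟩ <;> omega)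
    rw [PySem.List.pyRange_one_append (-w) 0 (w+1) (by omega) (by omega),
      PySem.List.pyRange_one_append 0 1 (w+1) (by omega) (by omega),
      PySem.List.pyRange_one_cons (show (0:Int) < 1 by omega),
      PySem.List.pyRange_one_eq_nil (show (1:Int) ≤ 0 + 1 by omega)]
    simp only [List.filter_append, List.filter_cons, List.filter_nil, hL, hR]
    norm_num
  · by_cases h1 : 1 ≤ r ∧ r ≤ w
    · have e1 : |(-r)| = r := by rw [abs_neg]; exact abs_of_nonneg (by omega)
      have e2 : |r| = r := abs_of_nonneg (by omega)
      have hA : (PySem.List.pyRange (-w) (-r) 1).filter (fun x => decide (|x| = r)) = [] :=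
        List.filter_eq_nil_iff.mpr (fun x hx => by
          rw [PySem.List.mem_pyRange_one] at hx
          simp only [decide_eq_true_eq]
          rcases abs_cases x with ⟨ha, hb⟩ | ⟨ha, hb⟩ <;> omega)
      have hB : (PySem.List.pyRange (-r+1) r 1).filter (fun x => decide (|x| = r)) = [] :=
        List.filter_eq_nil_iff.mpr (fun x hx => by
          rw [PySem.List.mem_pyRange_one] at hx
          simp only [decide_eq_true_eq]
          rcases abs_cases x with ⟨ha, hb⟩ | ⟨ha, hb⟩ <;> omega)
      have hC : (PySem.List.pyRange (r+1) (w+1) 1).filter (fun x => decide (|x| = r)) = [] :=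
        List.filter_eq_nil_iff.mpr (fun x hx => by
          rw [PySem.List.mem_pyRange_one] at hx
          simp only [decide_eq_true_eq]
          rcases abs_cases x with ⟨ha, hb⟩ | ⟨ha, hb⟩ <;> omega)
      rw [PySem.List.pyRange_one_append (-w) (-r) (w+1) (by omega) (by omega),
        PySem.List.pyRange_one_append (-r) (-r+1) (w+1) (by omega) (by omega),
        PySem.List.pyRange_one_append (-r+1) r (w+1) (by omega) (by omega),
        PySem.List.pyRange_one_append r (r+1) (w+1) (by omega) (by omega),
        PySem.List.pyRange_one_singleton, PySem.List.pyRange_one_singleton]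
      simp only [List.filter_append, hA, hB, hC, List.filter_singleton, e1, e2]
      simp [h0, h1]
    · rw [if_neg h0, if_neg h1, List.filter_eq_nil_iff.mpr]
      intro x hx
      rw [PySem.List.mem_pyRange_one] at hx
      simp only [decide_eq_true_eq]
      rcases abs_cases x with ⟨ha, hb⟩ | ⟨ha, hb⟩ <;> omega

-- the cells of row dy that land in ring c
lemma pv_row_filter (m c dy : Int) (hc : 2 ≤ c) (hcm : c ≤ m) (hdy : |dy| ≤ m) :
    (pvRowE m dy).filter (fun p => pvKey p == c) =
      if |dy| ≤ c then pvElems c dy else [] := by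
  unfold pvRowE
  rw [List.filter_map, show ((fun p => pvKey p == c) ∘ fun dx => (dx, dy)) =
    (fun dx => pvKey (dx, dy) == c) from rfl, List.filter_filter]
  have hcong : ∀ x ∈ PySem.List.pyRange (-m + |dy|) (m + 1 - |dy|) 1,
      ((pvKey (x, dy) == c) && decide (1 < |dy| + |x|)) = decide (|x| = c - |dy|) := by
    intro x _
    unfold pvKey
    rw [Bool.eq_iff_iff]
    simp only [Bool.and_eq_true, beq_iff_eq, decide_eq_true_eq]
    omega
  rw [List.filter_congr hcong,
    show (-m + |dy|) = -(m - |dy|) by ring, show (m + 1 - |dy|) = (m - |dy|) + 1 by ring,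
    pv_filter_abs (m - |dy|) (c - |dy|) (by omega)]
  by_cases h0 : c - |dy| = 0
  · rw [if_pos h0, if_pos (by omega)]
    unfold pvElems
    rw [if_pos h0]
    simp
  · by_cases h1 : |dy| ≤ c
    · rw [if_neg h0, if_pos ⟨by omega, by omega⟩, if_pos h1]
      unfold pvElems
      rw [if_neg h0]
      simp
    · rw [if_neg h0, if_neg (by omega), if_neg h1]
      simp

-- all of A's cells that land in ring c, in A's order, are exactly the ring in B's order
lemma pvE_filter (m c : Int) (hc : 2 ≤ c) (hcm : c ≤ m) :
    (pvE m).filter (fun p => pvKey p == c) = pvRing c := by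
  unfold pvE pvRing
  rw [List.filter_flatMap]
  rw [List.flatMap_congr (g := fun dy => if |dy| ≤ c then pvElems c dy else [])
    (fun dy hdy => by
      rw [PySem.List.mem_pyRange_one] at hdy
      exact pv_row_filter m c dy hc hcm (by rcases abs_cases dy with ⟨h1,h2⟩|⟨h1,h2⟩ <;> omega))]
  have hn1 : (PySem.List.pyRange (-m) (-c) 1).flatMap
      (fun dy => if |dy| ≤ c then pvElems c dy else []) = [] :=
    List.flatMap_eq_nil_iff.mpr (fun dy hdy => by
      rw [PySem.List.mem_pyRange_one] at hdy
      rw [if_neg (by rcases abs_cases dy with ⟨h1,h2⟩|⟨h1,h2⟩ <;> omega)])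
  have hn2 : (PySem.List.pyRange (c+1) (m+1) 1).flatMap
      (fun dy => if |dy| ≤ c then pvElems c dy else []) = [] :=
    List.flatMap_eq_nil_iff.mpr (fun dy hdy => by
      rw [PySem.List.mem_pyRange_one] at hdy
      rw [if_neg (by rcases abs_cases dy with ⟨h1,h2⟩|⟨h1,h2⟩ <;> omega)])
  rw [PySem.List.pyRange_one_append (-m) (-c) (m+1) (by omega) (by omega),
    PySem.List.pyRange_one_append (-c) (c+1) (m+1) (by omega) (by omega),
    List.flatMap_append, List.flatMap_append, hn1, hn2,
    List.nil_append, List.append_nil]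
  exact List.flatMap_congr (fun dy hdy => by
    rw [PySem.List.mem_pyRange_one] at hdy
    rw [if_pos (by rcases abs_cases dy with ⟨h1,h2⟩|⟨h1,h2⟩ <;> omega)])

lemma pv_rowK_eq (m dy : Int) : (pvRowE m dy).map pvKey = pvRowK m dy := by
  unfold pvRowE pvRowK
  rw [List.map_map]
  rfl

-- Phase 1 of the key-order argument: after the rows dy = -m … -m+j (j ≤ m-2),
-- the keys seen, in first-occurrence order, are m, m-1, …, m-j.
lemma pv_phase1 (m : Int) (hm : 2 ≤ m) : ∀ j : Nat, (j : Int) ≤ m - 2 →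
    PySem.Set.ofList ((PySem.List.pyRange (-m) (-m + j + 1) 1).flatMap (pvRowK m)) =
      PySem.List.pyRange m (m - j - 1) (-1) := by
  intro j
  induction j with
  | zero =>
    intro hj
    rw [show (-m + (0:Nat) + 1 : Int) = -m + 1 by push_cast; ring,
      PySem.List.pyRange_one_singleton]
    have habs : |(-m)| = m := by rw [abs_neg]; exact abs_of_nonneg (by omega)
    unfold pvRowK
    rw [show (PySem.List.pyRange m (m - (0:Nat) - 1) (-1)) = PySem.List.pyRange m (m-1) (-1) by
        push_cast; ring_nf]
    rw [PySem.List.pyRange_neg_one_cons (by omega), PySem.List.pyRange_neg_one_eq_nil (by omega)]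
    simp only [List.flatMap_cons, List.flatMap_nil, List.append_nil, habs]
    rw [show (-m + m) = (0:Int) by ring, show (m + 1 - m) = (0:Int) + 1 by ring,
      PySem.List.pyRange_one_singleton]
    rw [List.filter_singleton, show (decide (1 < m + |(0:Int)|)) = true by
      rw [decide_eq_true_eq]; rw [abs_zero, add_zero]; omega]
    simp only [cond_true, List.map_singleton, abs_zero, add_zero]
    simp [PySem.Set.ofList, PySem.Set.add]
  | succ j ih =>
    intro hj
    have ihe := ih (by push_cast at hj ⊢; omega)
    set a : Int := m - j - 1 with ha
    have hdy : |(-m + (j:Int) + 1)| = a := by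
      rw [abs_of_nonpos (by push_cast at hj ⊢; omega)]; rw [ha]; ring
    have ha2 : 2 ≤ a := by push_cast at hj; omega
    have ham : a ≤ m := by omega
    rw [show (m - ((j+1:Nat) : Int) - 1) = a - 1 by rw [ha]; push_cast; ring,
      show (-m + ((j+1:Nat):Int) + 1) = (-m + (j:Int) + 1) + 1 by push_cast; ring,
      PySem.List.pyRange_one_append (-m) (-m + (j:Int) + 1) ((-m + (j:Int) + 1) + 1)
        (by push_cast at hj ⊢; omega) (by omega),
      PySem.List.pyRange_one_singleton, List.flatMap_append, PySem.Set.ofList_append, ihe]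
    simp only [List.flatMap_cons, List.flatMap_nil, List.append_nil]
    unfold pvRowK
    rw [hdy, List.filter_eq_self.mpr (fun x _ => by
      simp only [decide_eq_true_eq]; have := abs_nonneg x; omega)]
    have hzero : PySem.List.pyRange 0 1 1 = [(0 : Int)] := by
      rw [PySem.List.pyRange_one_cons (by omega), PySem.List.pyRange_one_eq_nil (by omega)]
    have hsplit : PySem.List.pyRange (-m + a) (m + 1 - a) 1 =
        PySem.List.pyRange (-m + a) 0 1 ++ ([(0:Int)] ++ PySem.List.pyRange 1 (m + 1 - a) 1) := by
      rw [← hzero, ← PySem.List.pyRange_one_append 0 1 (m + 1 - a) (by omega) (by omega),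
        ← PySem.List.pyRange_one_append (-m + a) 0 (m + 1 - a) (by omega) (by omega)]
    rw [hsplit, List.map_append, List.map_append, PySem.Set.update_append,
      PySem.Set.update_append]
    have h1 : PySem.Set.update (PySem.List.pyRange m a (-1))
        ((PySem.List.pyRange (-m + a) 0 1).map (fun dx => a + |dx|)) =
        PySem.List.pyRange m a (-1) :=
      pv_update_eq_self _ _ (fun x hx => by
        rw [List.mem_map] at hx
        obtain ⟨dx, hdx, rfl⟩ := hx
        rw [PySem.List.mem_pyRange_one] at hdx
        rw [PySem.List.mem_pyRange_neg_one]
        rcases abs_cases dx with ⟨h1,h2⟩|⟨h1,h2⟩ <;> omega)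
    rw [h1, List.map_singleton, abs_zero, add_zero, pv_update_singleton,
      PySem.Set.add_of_not_mem (by rw [PySem.List.mem_pyRange_neg_one]; omega),
      pv_pyRange_neg_append m a ham]
    exact pv_update_eq_self _ _ (fun x hx => by
      rw [List.mem_map] at hx
      obtain ⟨dx, hdx, rfl⟩ := hx
      rw [PySem.List.mem_pyRange_one] at hdx
      rw [PySem.List.mem_pyRange_neg_one]
      rcases abs_cases dx with ⟨h1,h2⟩|⟨h1,h2⟩ <;> omega)

-- A's dict lists its keys as m, m-1, …, 2
lemma pvD_keys (m : Int) (hm : 2 ≤ m) : (pvD m).keys = PySem.List.pyRange m 1 (-1) := by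
  have hk : (pvD m).keys = PySem.Set.update PySem.Dict.empty.keys ((pvE m).map pvKey) :=
    PySem.Dict.keys_foldl_modify_key (pvE m) pvKey PySem.Set.empty (fun _ p s => s.add p)
      PySem.Dict.empty
  rw [hk, show PySem.Set.update (PySem.Dict.empty : PySem.Dict Int (PySem.Set (Int × Int))).keys
      ((pvE m).map pvKey) = PySem.Set.ofList ((pvE m).map pvKey) from
    PySem.Set.update_empty _]
  unfold pvE
  rw [List.map_flatMap, List.flatMap_congr (fun dy _ => pv_rowK_eq m dy)]
  rw [PySem.List.pyRange_one_append (-m) (-1) (m+1) (by omega) (by omega), List.flatMap_append,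
    PySem.Set.ofList_append]
  have h1 : PySem.Set.ofList ((PySem.List.pyRange (-m) (-1) 1).flatMap (pvRowK m)) =
      PySem.List.pyRange m 1 (-1) := by
    have := pv_phase1 m hm (m - 2).toNat (by omega)
    rw [show (-m + ((m-2).toNat : Int) + 1) = -1 by omega,
      show (m - ((m-2).toNat : Int) - 1) = 1 by omega] at this
    exact this
  rw [h1]
  apply pv_update_eq_self
  intro x hx
  rw [List.mem_flatMap] at hx
  obtain ⟨dy, hdy, hx⟩ := hx
  rw [PySem.List.mem_pyRange_one] at hdy
  unfold pvRowK at hx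
  rw [List.mem_map] at hx
  obtain ⟨dx, hdx, rfl⟩ := hx
  rw [List.mem_filter] at hdx
  obtain ⟨hdx, hgt⟩ := hdx
  rw [PySem.List.mem_pyRange_one] at hdx
  simp only [decide_eq_true_eq] at hgt
  rw [PySem.List.mem_pyRange_neg_one]
  constructor
  · omega
  · rcases abs_cases dy with ⟨h1,h2⟩|⟨h1,h2⟩ <;> rcases abs_cases dx with ⟨h3,h4⟩|⟨h3,h4⟩ <;> omega

-- every value A files into the dict
lemma pvD_getD (m c : Int) (hc : 2 ≤ c) (hcm : c ≤ m) :
    (pvD m).getD c PySem.Set.empty = PySem.Set.ofList (pvRing c) := by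
  unfold pvD
  rw [pv_getD_fold, PySem.Dict.getD_empty, pvE_filter m c hc hcm]
  exact PySem.Set.update_empty _

-- B's ring loop builds Set.ofList of the same ordered point list
lemma pv_ring_aux (c : Int) (l : List Int) (s : PySem.Set (Int × Int)) :
    l.foldl
      (fun ring dy =>
        let rem := c - |dy|
        let ring' := ring.add (-rem, dy)
        if rem ≠ 0 then ring'.add (rem, dy) else ring') s =
      PySem.Set.update s (l.flatMap (pvElems c)) := by
  induction l generalizing s with
  | nil => rfl
  | cons dy l ih =>
    rw [List.foldl_cons, List.flatMap_cons, PySem.Set.update_append, ih]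
    congr 1
    by_cases h : c - |dy| = 0
    · simp only [h, ne_eq, not_true_eq_false, neg_zero]
      rw [if_neg (fun hf => hf)]
      unfold pvElems
      rw [if_pos h, pv_update_singleton]
    · simp only [ne_eq, h, not_false_iff, if_pos]
      unfold pvElems
      rw [if_neg h]
      rfl

lemma pv_ringOf_eq (c : Int) : ringOf c = PySem.Set.ofList (pvRing c) := by
  unfold ringOf pvRing
  rw [pv_ring_aux, PySem.Set.update_empty]

lemma pv_keys_nodup (m : Int) : (PySem.List.pyRange m 1 (-1)).Nodup := by
  rw [PySem.List.pyRange_neg_one_eq_reverse, List.nodup_reverse]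
  exact PySem.List.nodup_pyRange_one _ _

-- B's port, evaluated: one ring per distance, keys m, m-1, …, 2
lemma pvB_eq (m : Int) : make_distances_alt m =
    (PySem.List.pyRange m 1 (-1)).map (fun c => (c, ringOf c)) := by
  unfold make_distances_alt
  rw [PySem.Dict.items_foldl_insert_fresh (PySem.List.pyRange m 1 (-1)) (fun d => d) ringOf
    PySem.Dict.empty (fun a _ => PySem.Dict.contains_empty a)
    (by simpa using pv_keys_nodup m)]
  rfl

-- A's port, evaluated, for m ≤ 1: nothing passes the `> 1` test
lemma pvE_nil (m : Int) (hm : m ≤ 1) : pvE m = [] := by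
  unfold pvE
  apply List.flatMap_eq_nil_iff.mpr
  intro dy hdy
  rw [PySem.List.mem_pyRange_one] at hdy
  unfold pvRowE
  rw [List.filter_eq_nil_iff.mpr, List.map_nil]
  intro dx hdx
  rw [PySem.List.mem_pyRange_one] at hdx
  simp only [decide_eq_true_eq, not_lt]
  rcases abs_cases dy with ⟨h1,h2⟩|⟨h1,h2⟩ <;> rcases abs_cases dx with ⟨h3,h4⟩|⟨h3,h4⟩ <;> omega

-- ===== VERDICT (by name: the statement is the Claim_ definition above) =====
theorem make_distances_spec : Claim_equal_make_distances := by
  intro m _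
  unfold Spec_make_distances
  rw [pvA_eq_items, pvB_eq]
  by_cases hm : 2 ≤ m
  · rw [PySem.Dict.items_eq_map_keys (pvD m) (by rw [pvD_keys m hm]; exact pv_keys_nodup m)
      PySem.Set.empty, pvD_keys m hm]
    apply List.map_congr_left
    intro c hc
    rw [PySem.List.mem_pyRange_neg_one] at hc
    rw [pvD_getD m c (by omega) (by omega), pv_ringOf_eq]
  · have h1 : pvD m = PySem.Dict.empty := by unfold pvD; rw [pvE_nil m (by omega)]; rfl
    rw [h1, PySem.List.pyRange_neg_one_eq_nil (by omega)]
    rfl
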